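-- pv_equiv track=rewrite | github.com/miraclefish/Sequential-NIAH-Benchmark | Sequential_NIAH_building_PPL_with_noise.py | gen_moved_text
-- ===== SOURCE A (Python) =====
-- def gen_moved_text(text_list, cut_idx_list, needles):
--
--     text_str = ''.join(text_list)
--     cut_idx_list = [-1] + cut_idx_list + [len(text_str) - 1]
--
--     shard_text = []
--     for s, e in zip(cut_idx_list[:-1], cut_idx_list[1:]):
--         shard_text.append(text_str[s+1:e+1])
--
--     assert len(shard_text) == len(needles) + 1
--     new_text = ''
--     for raw_shard_text, insert_str in zip(shard_text[:-1], needles):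
--         new_text += raw_shard_text + '\n' + insert_str + '\n'
--     new_text += shard_text[-1]
--     return new_text
-- ===== SOURCE B (Python) =====
-- def gen_moved_text(text_list, cut_idx_list, needles):
--     text_str = ''.join(text_list)
--     n = min(len(cut_idx_list), len(needles))
--     out = text_str[cut_idx_list[n - 1] + 1:] if n else text_str
--     for i in reversed(range(n)):
--         start = cut_idx_list[i - 1] + 1 if i else 0
--         out = text_str[start:cut_idx_list[i] + 1] + '\n' + needles[i] + '\n' + out
--     return out
-- ===== Notes on version B (the rewrite author's own statement) =====
-- stated objective: alternative
-- what changed: B builds the output BACK-TO-FRONT: it starts from the final tail slice and walks the cut/needle pairs right-to-left, prepending each text slice plus wrapped needle onto the accumulated suffix, instead of A's two staged forward passes (pad the index list, build a shard list, then concatenate shards with needles); Pre_ excludes the length-mismatched inputs on which A's assert raises AssertionError (B returns a value there).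
-- outside the precondition, e.g. on gen_moved_text(['ab'], [0], []): A raises AssertionError, B returns 'ab'
import Mathlib
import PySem

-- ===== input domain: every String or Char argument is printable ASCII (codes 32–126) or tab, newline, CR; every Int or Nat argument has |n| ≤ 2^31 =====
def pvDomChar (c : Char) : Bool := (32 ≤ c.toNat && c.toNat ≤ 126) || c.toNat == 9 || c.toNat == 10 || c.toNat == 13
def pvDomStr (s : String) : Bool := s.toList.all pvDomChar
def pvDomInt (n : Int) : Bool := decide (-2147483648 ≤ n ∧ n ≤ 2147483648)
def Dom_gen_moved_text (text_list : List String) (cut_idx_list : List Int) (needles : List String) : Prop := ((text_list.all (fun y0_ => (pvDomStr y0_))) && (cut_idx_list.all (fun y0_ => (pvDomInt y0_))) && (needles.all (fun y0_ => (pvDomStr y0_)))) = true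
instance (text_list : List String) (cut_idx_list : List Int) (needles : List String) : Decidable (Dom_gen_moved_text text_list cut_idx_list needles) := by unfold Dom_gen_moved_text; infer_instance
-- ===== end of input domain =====

-- B builds the output back-to-front (right-to-left over the cut/needle pairs, prepending onto the suffix) instead of A's two staged forward passes; same cost, different traversal.

-- ===== PORT A =====
-- Strings are handled on the List Char side via PySem.Chars (Lean's String ops are kernel-opaque).
-- ''.join(text_list), shared by both ports (both Pythons start with the same join)
def pvText (text_list : List String) : List Char := PySem.Chars.join [] (text_list.map String.toList)

def gen_moved_text (text_list : List String) (cut_idx_list : List Int) (needles : List String) : String :=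
  let text_str : List Char := pvText text_list
  let cuts : List Int := [-1] ++ cut_idx_list ++ [(text_str.length : Int) - 1]
  let shard_text : List (List Char) :=
    (List.zip (PySem.List.slice cuts none (some (-1))) (PySem.List.slice cuts (some 1) none)).foldl
      (fun acc se => acc ++ [PySem.List.slice text_str (some (se.1 + 1)) (some (se.2 + 1))]) []
  -- assert len(shard_text) == len(needles) + 1  : raises AssertionError exactly outside Pre_gen_moved_text
  let new_text : List Char :=
    (List.zip (PySem.List.slice shard_text none (some (-1))) (needles.map String.toList)).foldl
      (fun acc p => acc ++ p.1 ++ ['\n'] ++ p.2 ++ ['\n']) []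
  -- shard_text[-1]: shard_text always has ≥ 1 element (cuts has ≥ 2), so the default is never used
  String.ofList (new_text ++ PySem.List.pyGetD shard_text (-1) [])

-- ===== PORT B =====
def gen_moved_text_alt (text_list : List String) (cut_idx_list : List Int) (needles : List String) : String :=
  let text_str : List Char := pvText text_list
  let ns : List (List Char) := needles.map String.toList
  let n : Nat := min cut_idx_list.length ns.length
  -- out = text_str[cut_idx_list[n-1]+1:] if n else text_str
  let out0 : List Char :=
    if n = 0 then text_str
    else PySem.List.slice text_str (some (PySem.List.pyGetD cut_idx_list ((n : Int) - 1) 0 + 1)) none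
  -- for i in reversed(range(n)): prepend text_str[start:cut+1] + '\n' + needles[i] + '\n'
  let out : List Char :=
    ((List.range n).reverse).foldl
      (fun (out : List Char) (i : Nat) =>
        let start : Int := if i = 0 then 0 else PySem.List.pyGetD cut_idx_list ((i : Int) - 1) 0 + 1
        PySem.List.slice text_str (some start) (some (PySem.List.pyGetD cut_idx_list (i : Int) 0 + 1))
          ++ '\n' :: (PySem.List.pyGetD ns (i : Int) [] ++ '\n' :: out))
      out0
  String.ofList out

-- ===== PRECONDITION & SPEC =====
-- A's assert raises AssertionError unless the two lists have equal length; Pre_ excludes exactly those raising inputs (B returns a value there).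
def Pre_gen_moved_text (text_list : List String) (cut_idx_list : List Int) (needles : List String) : Prop :=
  cut_idx_list.length = needles.length
instance (text_list : List String) (cut_idx_list : List Int) (needles : List String) : Decidable (Pre_gen_moved_text text_list cut_idx_list needles) := by unfold Pre_gen_moved_text; infer_instance

def pvWitness_gen_moved_text : List String × List Int × List String := (["ab"], [0], ["X"])

def Spec_gen_moved_text (text_list : List String) (cut_idx_list : List Int) (needles : List String) (out : String) : Prop := out = gen_moved_text_alt text_list cut_idx_list needles
instance (text_list : List String) (cut_idx_list : List Int) (needles : List String) (out : String) : Decidable (Spec_gen_moved_text text_list cut_idx_list needles out) := by unfold Spec_gen_moved_text; infer_instance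

-- ===== CLAIM (what is proved, stated in full; the proofs are below) =====
def Claim_equal_gen_moved_text : Prop := ∀ (text_list : List String) (cut_idx_list : List Int) (needles : List String), Dom_gen_moved_text text_list cut_idx_list needles → Pre_gen_moved_text text_list cut_idx_list needles → Spec_gen_moved_text text_list cut_idx_list needles (gen_moved_text text_list cut_idx_list needles)
-- ===== LEMMAS AND PROOFS =====

-- the common meaning both ports compute: shards of text between successive cut points, interleaved with '\n'-wrapped needles
def pvItl (text : List Char) : Int → List Int → List (List Char) → List Char
  | prev, c :: cs, nd :: ns =>
      PySem.List.slice text (some prev) (some (c + 1)) ++ ['\n'] ++ nd ++ ['\n'] ++ pvItl text (c + 1) cs ns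
  | prev, _, _ => PySem.List.slice text (some prev) none

-- A's shard list, written as a direct recursion over the inner cut list
def pvConsecMap (f : Int × Int → List Char) : Int → List Int → List (List Char)
  | _, [] => []
  | s, c :: cs => f (s, c) :: pvConsecMap f c cs

theorem pvSliceLen (xs : List Char) (a : Int) :
    PySem.List.slice xs (some a) (some (xs.length : Int)) = PySem.List.slice xs (some a) none := by
  have hclamp : PySem.List.clampIdx xs.length (xs.length : Int) = xs.length := by
    simp [PySem.List.clampIdx]
  rw [PySem.List.slice_some_none]
  simp only [PySem.List.slice, hclamp]
  exact List.take_of_length_le (by simp)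

theorem pvZipConsec (f : Int × Int → List Char) (l : List Int) :
    ∀ s : Int, (List.zip ((s :: l).dropLast) ((s :: l).tail)).map f = pvConsecMap f s l := by
  induction l with
  | nil => intro s; simp [pvConsecMap]
  | cons c cs ih =>
      intro s
      have h := ih c
      simp only [List.tail_cons] at h ⊢
      rw [List.dropLast_cons_of_ne_nil (by simp)]
      cases cs with
      | nil => simp [pvConsecMap]
      | cons d ds =>
          rw [List.dropLast_cons_of_ne_nil (by simp)] at h ⊢
          simp only [List.zip_cons_cons, List.map_cons, pvConsecMap] at h ⊢
          exact congrArg _ h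

theorem pvConsecMap_ne_nil (f : Int × Int → List Char) (s : Int) (l : List Int) (e : Int) :
    pvConsecMap f s (l ++ [e]) ≠ [] := by
  cases l <;> simp [pvConsecMap]

-- A's two forward loops compute pvItl
theorem pvAloop (text : List Char) (cs : List Int) :
    ∀ ns : List (List Char), cs.length = ns.length → ∀ (s0 : Int) (acc : List Char),
    (List.zip ((pvConsecMap (fun se => PySem.List.slice text (some (se.1 + 1)) (some (se.2 + 1))) s0
        (cs ++ [(text.length : Int) - 1])).dropLast) ns).foldl
      (fun acc p => acc ++ p.1 ++ ['\n'] ++ p.2 ++ ['\n']) acc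
    ++ PySem.List.pyGetD (pvConsecMap (fun se => PySem.List.slice text (some (se.1 + 1)) (some (se.2 + 1))) s0
        (cs ++ [(text.length : Int) - 1])) (-1) []
    = acc ++ pvItl text (s0 + 1) cs ns := by
  induction cs with
  | nil =>
      intro ns hlen s0 acc
      cases ns with
      | cons _ _ => simp at hlen
      | nil =>
          simp only [List.nil_append, pvConsecMap]
          rw [PySem.List.pyGetD_neg_one _ _ (by simp), List.getLast_singleton]
          have h1 : ((text.length : Int) - 1 + 1) = (text.length : Int) := by ring
          rw [h1, pvSliceLen]
          simp [pvItl]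
  | cons c cs' ih =>
      intro ns hlen s0 acc
      cases ns with
      | nil => simp at hlen
      | cons nd ns' =>
          have hlen' : cs'.length = ns'.length := by simpa using hlen
          simp only [List.cons_append, pvConsecMap]
          have hne := pvConsecMap_ne_nil (fun se => PySem.List.slice text (some (se.1 + 1)) (some (se.2 + 1))) c cs' ((text.length : Int) - 1)
          rw [List.dropLast_cons_of_ne_nil hne]
          simp only [List.zip_cons_cons, List.foldl_cons]
          rw [PySem.List.pyGetD_neg_one _ _ (by simp), List.getLast_cons hne,
            ← PySem.List.pyGetD_neg_one _ ([] : List Char) hne]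
          rw [ih ns' hlen' c _]
          simp [pvItl, List.append_assoc]

-- the suffix that B's accumulator holds before iteration i = m-1 runs: pvItl from pair m on
def pvTail (text : List Char) (cs : List Int) (ns : List (List Char)) (m : Nat) : List Char :=
  pvItl text (if m = 0 then 0 else PySem.List.pyGetD cs ((m : Int) - 1) 0 + 1) (cs.drop m) (ns.drop m)

-- B's backward loop: folding the reversed range m..0 from the suffix at m reaches the suffix at 0
theorem pvBrev (text : List Char) (cs : List Int) (ns : List (List Char)) :
    ∀ m : Nat, m ≤ cs.length → m ≤ ns.length →
    ((List.range m).reverse).foldl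
      (fun (out : List Char) (i : Nat) =>
        let start : Int := if i = 0 then 0 else PySem.List.pyGetD cs ((i : Int) - 1) 0 + 1
        PySem.List.slice text (some start) (some (PySem.List.pyGetD cs (i : Int) 0 + 1))
          ++ '\n' :: (PySem.List.pyGetD ns (i : Int) [] ++ '\n' :: out))
      (pvTail text cs ns m)
    = pvTail text cs ns 0 := by
  intro m
  induction m with
  | zero => intro _ _; simp
  | succ k ih =>
      intro hc hn
      rw [List.range_succ, List.reverse_append, List.reverse_singleton, List.singleton_append,
        List.foldl_cons]
      have hk_c : k < cs.length := by omega
      have hk_n : k < ns.length := by omega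
      have hstep :
          (PySem.List.slice text (some (if k = 0 then 0 else PySem.List.pyGetD cs ((k : Int) - 1) 0 + 1))
              (some (PySem.List.pyGetD cs (k : Int) 0 + 1))
            ++ '\n' :: (PySem.List.pyGetD ns (k : Int) [] ++ '\n' :: pvTail text cs ns (k + 1)))
          = pvTail text cs ns k := by
        have hdc : cs.drop k = cs[k] :: cs.drop (k + 1) := List.drop_eq_getElem_cons hk_c
        have hdn : ns.drop k = ns[k] :: ns.drop (k + 1) := List.drop_eq_getElem_cons hk_n
        have hgc : PySem.List.pyGetD cs (k : Int) 0 = cs[k] := by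
          simp [PySem.List.pyGetD_natCast, List.getD_eq_getElem?_getD, hk_c]
        have hgn : PySem.List.pyGetD ns (k : Int) [] = ns[k] := by
          simp [PySem.List.pyGetD_natCast, List.getD_eq_getElem?_getD, hk_n]
        have hcast : ((k + 1 : Nat) : Int) - 1 = ((k : Nat) : Int) := by push_cast; ring
        unfold pvTail
        rw [hdc, hdn, hgc, hgn]
        simp [pvItl, hgc]
      rw [hstep, ih (by omega) (by omega)]

-- ===== VERDICT (by name: the statement is the Claim_ definition above) =====
theorem gen_moved_text_spec : Claim_equal_gen_moved_text := by
  intro text_list cut_idx_list needles _ hpre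
  unfold Spec_gen_moved_text
  simp only [gen_moved_text, gen_moved_text_alt]
  generalize pvText text_list = T
  have hlen : cut_idx_list.length = (needles.map String.toList).length := by simpa using hpre
  -- A-side reduces to pvItl T 0
  simp only [PySem.List.slice_to_neg_one, PySem.List.slice_from_one,
    PySem.List.foldl_append_singleton_eq_map, List.cons_append, List.nil_append]
  rw [pvZipConsec]
  rw [pvAloop T cut_idx_list (needles.map String.toList) hlen (-1) []]
  -- B-side reduces to pvItl T 0 via the backward-fold lemma
  have hmin : min cut_idx_list.length (needles.map String.toList).length = cut_idx_list.length := by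
    omega
  rw [hmin]
  have h0 : pvTail T cut_idx_list (needles.map String.toList) 0
      = pvItl T 0 cut_idx_list (needles.map String.toList) := by
    simp [pvTail]
  have hinit :
      (if cut_idx_list.length = 0 then T
       else PySem.List.slice T (some (PySem.List.pyGetD cut_idx_list ((cut_idx_list.length : Int) - 1) 0 + 1)) none)
      = pvTail T cut_idx_list (needles.map String.toList) cut_idx_list.length := by
    by_cases h : cut_idx_list.length = 0
    · have hnil : cut_idx_list = [] := List.eq_nil_of_length_eq_zero h
      subst hnil
      simp [pvTail, pvItl]
    · unfold pvTail
      have hdn : (needles.map String.toList).drop cut_idx_list.length = [] := by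
        rw [hlen]; exact List.drop_length
      simp only [if_neg h, List.drop_length, hdn]
      simp [pvItl]
  rw [hinit, pvBrev T cut_idx_list (needles.map String.toList) cut_idx_list.length le_rfl hlen.le, h0]
  norm_num
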